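-- pv_equiv track=rewrite | github.com/tholsapp/Hangman | hangman/games/hangman/utility.py | generate_word_dict
-- ===== SOURCE A (Python) =====
-- def generate_word_dict(word):
--   word_dict = {}  # dictionary of word
--   i = 0           # position of char in word
--   for key in word:
--     if key in word_dict:
--       word_dict[key].append(i)
--     else:
--       word_dict[key] = [i]
--     i = i + 1
--   return word_dict
-- ===== SOURCE B (Python) =====
-- def generate_word_dict(word):
--   return {c: [i for i, x in enumerate(word) if x == c] for c in word}
-- ===== Notes on version B (the rewrite author's own statement) =====
-- stated objective: idiomatic
-- what changed: Replaces the single accumulating pass with an explicit counter by a dict comprehension that, for each character, collects its indices with an enumerate scan.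
import Mathlib
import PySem

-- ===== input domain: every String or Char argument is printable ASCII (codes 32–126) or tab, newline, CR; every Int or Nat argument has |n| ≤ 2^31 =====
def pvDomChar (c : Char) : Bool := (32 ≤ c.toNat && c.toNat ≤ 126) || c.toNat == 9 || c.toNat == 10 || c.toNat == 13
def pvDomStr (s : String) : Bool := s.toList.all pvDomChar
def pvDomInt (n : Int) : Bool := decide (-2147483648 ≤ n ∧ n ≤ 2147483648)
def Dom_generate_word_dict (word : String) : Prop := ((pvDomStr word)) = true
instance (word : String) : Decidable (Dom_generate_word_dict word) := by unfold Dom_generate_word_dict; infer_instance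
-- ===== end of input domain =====

-- B replaces A's single accumulating pass (explicit counter, append-or-create) by a dict
-- comprehension that scans enumerate(word) once per character; same return value, no speed claim.


-- ===== PORT A =====
-- 'for key in word: … i = i + 1' with the running counter ported as enumerate over the chars
def generate_word_dict (word : String) : List (String × List Int) :=
  ((PySem.List.enumerate word.toList 0).foldl
    (fun wd p =>
      if wd.contains (String.singleton p.2) then
        wd.modify (String.singleton p.2) [] (· ++ [p.1])   -- word_dict[key].append(i)
      else
        wd.insert (String.singleton p.2) [p.1])            -- word_dict[key] = [i]
    PySem.Dict.empty).items

-- ===== PORT B =====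
-- {c: [i for i, x in enumerate(word) if x == c] for c in word}
def generate_word_dict_alt (word : String) : List (String × List Int) :=
  (word.toList.foldl
    (fun wd c =>
      wd.insert (String.singleton c)
        (((PySem.List.enumerate word.toList 0).filter (fun p => p.2 == c)).map (·.1)))
    PySem.Dict.empty).items

-- ===== PRECONDITION & SPEC =====
def Spec_generate_word_dict (word : String) (out : List (String × List Int)) : Prop := out = generate_word_dict_alt word
instance (word : String) (out : List (String × List Int)) : Decidable (Spec_generate_word_dict word out) := by unfold Spec_generate_word_dict; infer_instance

-- ===== CLAIM (what is proved, stated in full; the proofs are below) =====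
def Claim_equal_generate_word_dict : Prop := ∀ (word : String), Dom_generate_word_dict word → Spec_generate_word_dict word (generate_word_dict word)

-- ===== LEMMAS AND PROOFS =====

theorem singleton_inj {c d : Char} (h : String.singleton c = String.singleton d) : c = d := by
  have := congrArg String.toList h
  simpa using this

-- A's if-branch (append for a present key, create for a fresh one) is exactly Dict.modify
theorem stepA_eq_modify (wd : PySem.Dict String (List Int)) (k : String) (i : Int) :
    (if wd.contains k then wd.modify k [] (· ++ [i]) else wd.insert k [i])
      = wd.modify k [] (· ++ [i]) := by
  split_ifs with h
  · rfl
  · simp [PySem.Dict.modify, PySem.Dict.getD_of_not_contains wd [] (by simpa using h)]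

-- value of B's insert loop at a key that occurs in the list
theorem getD_insert_loop (v : Char → List Int) (l : List Char)
    (d : PySem.Dict String (List Int)) (c : Char) :
    (l.foldl (fun wd x => wd.insert (String.singleton x) (v x)) d).getD (String.singleton c) []
      = if c ∈ l then v c else d.getD (String.singleton c) [] := by
  induction l generalizing d with
  | nil => simp
  | cons x l ih =>
    simp only [List.foldl_cons, ih]
    by_cases hm : c ∈ l
    · simp [hm]
    · by_cases he : c = x
      · subst he; simp [hm, PySem.Dict.getD_insert_self]
      · have : String.singleton c ≠ String.singleton x := fun h => he (singleton_inj h)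
        simp [hm, he, PySem.Dict.getD_insert_of_ne d (v x) [] this]

-- the two dicts built by the ports
def dictA (word : String) : PySem.Dict String (List Int) :=
  (PySem.List.enumerate word.toList 0).foldl
    (fun wd p => wd.modify (String.singleton p.2) [] (· ++ [p.1])) PySem.Dict.empty

def dictB (word : String) : PySem.Dict String (List Int) :=
  word.toList.foldl
    (fun wd c =>
      wd.insert (String.singleton c)
        (((PySem.List.enumerate word.toList 0).filter (fun p => p.2 == c)).map (·.1)))
    PySem.Dict.empty

theorem generate_word_dict_eq_dictA (word : String) :
    generate_word_dict word = (dictA word).items := by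
  unfold generate_word_dict dictA
  rw [show (fun wd (p : Int × Char) =>
        if wd.contains (String.singleton p.2) then
          wd.modify (String.singleton p.2) [] (· ++ [p.1])
        else wd.insert (String.singleton p.2) [p.1])
      = (fun wd (p : Int × Char) => wd.modify (String.singleton p.2) [] (· ++ [p.1])) from
      funext fun wd => funext fun p => stepA_eq_modify wd (String.singleton p.2) p.1]

theorem keysA (word : String) :
    (dictA word).keys = PySem.Set.ofList (word.toList.map String.singleton) := by
  unfold dictA
  rw [PySem.Dict.keys_foldl_modify_key
        (PySem.List.enumerate word.toList 0) (fun p => String.singleton p.2) []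
        (fun _ p old => old ++ [p.1]) PySem.Dict.empty,
      show List.map (fun p : Int × Char => String.singleton p.2) (PySem.List.enumerate word.toList 0)
        = List.map String.singleton (List.map (fun p : Int × Char => p.2) (PySem.List.enumerate word.toList 0)) from
        (List.map_map ..).symm,
      PySem.List.map_snd_enumerate, PySem.Dict.keys_empty, PySem.Set.update_nil_left]

theorem keysB (word : String) :
    (dictB word).keys = PySem.Set.ofList (word.toList.map String.singleton) := by
  unfold dictB
  rw [PySem.Dict.keys_foldl_insert_key, PySem.Dict.keys_empty, PySem.Set.update_nil_left]

theorem getD_dictA (word : String) (c : Char) :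
    (dictA word).getD (String.singleton c) []
      = ((PySem.List.enumerate word.toList 0).filter (fun p => p.2 == c)).map (·.1) := by
  unfold dictA
  rw [show (PySem.List.enumerate word.toList 0).foldl
        (fun wd p => wd.modify (String.singleton p.2) [] (· ++ [p.1])) PySem.Dict.empty
      = ((PySem.List.enumerate word.toList 0).map
          (fun p => (String.singleton p.2, p.1))).foldl
        (fun wd q => wd.modify q.1 [] (· ++ [q.2])) PySem.Dict.empty from
      (List.foldl_map (f := fun p : Int × Char => (String.singleton p.2, p.1))
        (g := fun (wd : PySem.Dict String (List Int)) (q : String × Int) => wd.modify q.1 [] (· ++ [q.2]))).symm]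
  rw [PySem.Dict.getD_foldl_modify_append]
  simp [List.filter_map, List.map_map, Function.comp_def]
  congr 1
  apply List.filter_congr
  intro p _
  by_cases h : p.2 = c
  · simp [h]
  · have : String.singleton p.2 ≠ String.singleton c := fun hs => h (singleton_inj hs)
    simp [h, this]

theorem getD_dictB (word : String) (c : Char) (hc : c ∈ word.toList) :
    (dictB word).getD (String.singleton c) []
      = ((PySem.List.enumerate word.toList 0).filter (fun p => p.2 == c)).map (·.1) := by
  unfold dictB
  rw [getD_insert_loop]
  simp [hc]

theorem nodup_keysA (word : String) : (dictA word).keys.Nodup := by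
  rw [keysA]; exact PySem.Set.nodup_ofList _

theorem nodup_keysB (word : String) : (dictB word).keys.Nodup := by
  rw [keysB]; exact PySem.Set.nodup_ofList _

-- ===== VERDICT (by name: the statement is the Claim_ definition above) =====
theorem generate_word_dict_spec : Claim_equal_generate_word_dict := by
  intro word _
  show generate_word_dict word = generate_word_dict_alt word
  rw [generate_word_dict_eq_dictA]
  show (dictA word).items = (dictB word).items
  rw [PySem.Dict.items_eq_map_keys (dictA word) (nodup_keysA word) [],
      PySem.Dict.items_eq_map_keys (dictB word) (nodup_keysB word) [],
      keysA, keysB]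
  apply List.map_congr_left
  intro k hk
  have hk' : k ∈ word.toList.map String.singleton := (PySem.Set.mem_ofList _ _).1 hk
  obtain ⟨c, hc, rfl⟩ := List.mem_map.1 hk'
  rw [getD_dictA, getD_dictB word c hc]
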